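-- pv_equiv track=rewrite | github.com/gaurab123-cell/Snake-Game | Search_algorithms.py | bfs
-- ===== SOURCE A (Python) =====
-- from collections import deque
--
-- def bfs(start, goal, obstacles, rows, cols):
--     queue = deque([(start, [])])  # (current_position, path_taken)
--     visited = set()
--     visited.add(start)
--
--     directions = [(-1, 0), (1, 0), (0, -1), (0, 1)]  # Up, Down, Left, Right
--
--     while queue:
--         (current, path) = queue.popleft()
--
--         if current == goal:
--             return path  # Return the shortest path to the food
--
--         for d in directions:
--             next_pos = (current[0] + d[0], current[1] + d[1])
--
--             if (0 <= next_pos[0] < rows and 0 <= next_pos[1] < cols and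
--                 next_pos not in obstacles and next_pos not in visited):
--                 queue.append((next_pos, path + [d]))
--                 visited.add(next_pos)
--
--     return []  # No valid path found
-- ===== SOURCE B (Python) =====
-- from collections import deque
--
-- def bfs(start, goal, obstacles, rows, cols):
--     # BFS over bare cells, a different organisation of the same search:
--     # a single parent dict (cell -> (previous cell, direction), start -> None)
--     # doubles as the visited set, and the path is reconstructed once at the goal.
--     parent = {start: None}
--     queue = deque([start])
--     while queue:
--         cur = queue.popleft()
--         if cur == goal:
--             steps = []
--             while parent[cur] is not None:
--                 prev, d = parent[cur]
--                 steps.append(d)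
--                 cur = prev
--             return steps[::-1]
--         r, c = cur[0], cur[1]
--         cand = [((-1, 0), (r - 1, c)), ((1, 0), (r + 1, c)),
--                 ((0, -1), (r, c - 1)), ((0, 1), (r, c + 1))]
--         for d, np_ in cand:
--             if (0 <= np_[0] < rows and 0 <= np_[1] < cols and
--                     np_ not in obstacles and np_ not in parent):
--                 parent[np_] = (cur, d)
--                 queue.append(np_)
--     return []
-- ===== Notes on version B (the rewrite author's own statement) =====
-- stated objective: alternative
-- what changed: B drops both the per-entry path copies and the separate visited set: it enqueues bare cells, records reachability in a single parent dict (cell -> (previous cell, direction)) which doubles as the visited set, and reconstructs the direction list once when the goal is popped.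
import Mathlib
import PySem

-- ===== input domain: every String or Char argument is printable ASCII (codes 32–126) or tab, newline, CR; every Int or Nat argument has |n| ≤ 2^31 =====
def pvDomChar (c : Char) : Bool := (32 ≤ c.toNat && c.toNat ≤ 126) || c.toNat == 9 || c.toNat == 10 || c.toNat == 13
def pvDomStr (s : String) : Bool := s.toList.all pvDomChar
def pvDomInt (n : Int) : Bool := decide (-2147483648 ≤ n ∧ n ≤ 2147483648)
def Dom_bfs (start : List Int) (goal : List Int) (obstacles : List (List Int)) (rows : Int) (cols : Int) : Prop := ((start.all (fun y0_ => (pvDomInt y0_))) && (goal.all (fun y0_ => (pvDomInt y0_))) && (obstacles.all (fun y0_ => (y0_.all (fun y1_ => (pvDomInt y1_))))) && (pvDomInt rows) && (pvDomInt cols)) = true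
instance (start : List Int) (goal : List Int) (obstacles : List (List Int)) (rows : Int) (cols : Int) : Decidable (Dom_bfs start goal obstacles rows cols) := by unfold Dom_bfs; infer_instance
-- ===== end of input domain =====

-- B replaces A's per-enqueue path copying and separate visited set by a single
-- parent dict (cell -> previous cell + direction, start -> none) that doubles as
-- the visited set, with one path reconstruction at the goal (objective: alternative).
-- Python's hash set / dict are ported as Std.HashSet / Std.HashMap: each is used
-- only through contains / lookup / insert (never iterated), on which they are
-- exact for Python's set and dict, and they let the ports evaluate on the same
-- flood-filled grids their Pythons handle.
-- Both outer loops carry a fuel counter (2*rows*cols+1) purely as a totality guard: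
-- it strictly bounds the number of BFS iterations, since every enqueue marks a
-- fresh in-grid cell.

-- directions: Up, Down, Left, Right (as the length-2 tuples they are in Python)
def pvDirs : List (List Int) := [[-1, 0], [1, 0], [0, -1], [0, 1]]

-- ===== PORT A =====
-- the inner 'for d in directions' loop of A (state: queue, visited)
-- current[0]/current[1]/d[0]/d[1] are ported with pyGetD: exact here because every
-- direction has length 2 and Pre_bfs guarantees the only indexed position, start,
-- has length ≥ 2 (all later positions have length 2 by construction).
def pvDirLoopA (obstacles : List (List Int)) (rows cols : Int) (cur : List Int)
    (path : List (List Int)) :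
    List (List Int) → List (List Int × List (List Int)) → Std.HashSet (List Int) →
    List (List Int × List (List Int)) × Std.HashSet (List Int)
  | [], q, v => (q, v)
  | d :: ds, q, v =>
    let np : List Int := [PySem.List.pyGetD cur 0 0 + PySem.List.pyGetD d 0 0,
                          PySem.List.pyGetD cur 1 0 + PySem.List.pyGetD d 1 0]
    if 0 ≤ PySem.List.pyGetD np 0 0 ∧ PySem.List.pyGetD np 0 0 < rows ∧
       0 ≤ PySem.List.pyGetD np 1 0 ∧ PySem.List.pyGetD np 1 0 < cols ∧
       np ∉ obstacles ∧ v.contains np = false then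
      pvDirLoopA obstacles rows cols cur path ds (q ++ [(np, path ++ [d])]) (v.insert np)
    else
      pvDirLoopA obstacles rows cols cur path ds q v

-- A's 'while queue' loop: queue of (position, path taken)
def pvLoopA (goal : List Int) (obstacles : List (List Int)) (rows cols : Int) :
    Nat → List (List Int × List (List Int)) → Std.HashSet (List Int) → List (List Int)
  | 0, _, _ => []
  | _ + 1, [], _ => []
  | f + 1, (cur, path) :: rest, v =>
    if cur = goal then path
    else
      let s := pvDirLoopA obstacles rows cols cur path pvDirs rest v
      pvLoopA goal obstacles rows cols f s.1 s.2

def bfs (start : List Int) (goal : List Int) (obstacles : List (List Int)) (rows : Int) (cols : Int) : List (List Int) :=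
  pvLoopA goal obstacles rows cols (2 * (rows * cols).toNat + 1)
    [(start, [])] (Std.HashSet.emptyWithCapacity.insert start)

-- ===== PORT B =====
-- B's 'while parent[cur] is not None' reconstruction; steps[::-1] is acc.reverse.
-- The fuel (parent.size) is a totality guard only; the outer none branch is
-- Python's KeyError, unreachable from states pvLoopB produces.
def pvReconB : Nat → Std.HashMap (List Int) (Option (List Int × List Int)) →
    List Int → List (List Int) → List (List Int)
  | 0, _, _, _ => []
  | f + 1, par, cur, acc =>
    match par[cur]? with
    | some none => acc.reverse
    | some (some (prev, d)) => pvReconB f par prev (acc ++ [d])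
    | none => []

-- B's 'for d, np_ in cand' body (state: queue of bare cells, parent dict)
def pvStepB (obstacles : List (List Int)) (rows cols : Int) (cur : List Int)
    (st : List (List Int) × Std.HashMap (List Int) (Option (List Int × List Int)))
    (dn : List Int × List Int) :
    List (List Int) × Std.HashMap (List Int) (Option (List Int × List Int)) :=
  if 0 ≤ PySem.List.pyGetD dn.2 0 0 ∧ PySem.List.pyGetD dn.2 0 0 < rows ∧
     0 ≤ PySem.List.pyGetD dn.2 1 0 ∧ PySem.List.pyGetD dn.2 1 0 < cols ∧
     dn.2 ∉ obstacles ∧ st.2.contains dn.2 = false then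
    (st.1 ++ [dn.2], st.2.insert dn.2 (some (cur, dn.1)))
  else st

-- B's 'while queue' loop
def pvLoopB (goal : List Int) (obstacles : List (List Int)) (rows cols : Int) :
    Nat → List (List Int) → Std.HashMap (List Int) (Option (List Int × List Int)) →
    List (List Int)
  | 0, _, _ => []
  | _ + 1, [], _ => []
  | f + 1, cur :: rest, par =>
    if cur = goal then pvReconB par.size par cur []
    else
      let r := PySem.List.pyGetD cur 0 0
      let c := PySem.List.pyGetD cur 1 0
      let cand : List (List Int × List Int) :=
        [([-1, 0], [r - 1, c]), ([1, 0], [r + 1, c]),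
         ([0, -1], [r, c - 1]), ([0, 1], [r, c + 1])]
      let s := cand.foldl (pvStepB obstacles rows cols cur) (rest, par)
      pvLoopB goal obstacles rows cols f s.1 s.2

def bfs_alt (start : List Int) (goal : List Int) (obstacles : List (List Int)) (rows : Int) (cols : Int) : List (List Int) :=
  pvLoopB goal obstacles rows cols (2 * (rows * cols).toNat + 1)
    [start] (Std.HashMap.emptyWithCapacity.insert start none)

-- ===== PRECONDITION & SPEC =====
-- A (and B) raises IndexError iff start ≠ goal and start has fewer than 2
-- components (current[1] on the popped start); Pre_ excludes exactly those inputs.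
def Pre_bfs (start : List Int) (goal : List Int) (obstacles : List (List Int)) (rows : Int) (cols : Int) : Prop :=
  start = goal ∨ 2 ≤ start.length
instance (start : List Int) (goal : List Int) (obstacles : List (List Int)) (rows : Int) (cols : Int) : Decidable (Pre_bfs start goal obstacles rows cols) := by unfold Pre_bfs; infer_instance

def pvWitness_bfs : List Int × List Int × List (List Int) × Int × Int :=
  ([0, 0], [1, 1], [[0, 1]], 2, 2)

def Spec_bfs (start : List Int) (goal : List Int) (obstacles : List (List Int)) (rows : Int) (cols : Int) (out : List (List Int)) : Prop := out = bfs_alt start goal obstacles rows cols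
instance (start : List Int) (goal : List Int) (obstacles : List (List Int)) (rows : Int) (cols : Int) (out : List (List Int)) : Decidable (Spec_bfs start goal obstacles rows cols out) := by unfold Spec_bfs; infer_instance

-- ===== CLAIM (what is proved, stated in full; the proofs are below) =====
def Claim_equal_bfs : Prop := ∀ (start : List Int) (goal : List Int) (obstacles : List (List Int)) (rows : Int) (cols : Int), Dom_bfs start goal obstacles rows cols → Pre_bfs start goal obstacles rows cols → Spec_bfs start goal obstacles rows cols (bfs start goal obstacles rows cols)

-- ===== LEMMAS AND PROOFS =====

-- A parent chain from p back to start whose directions, read forward, are `path`.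
inductive pvChain (par : Std.HashMap (List Int) (Option (List Int × List Int))) :
    List Int → List (List Int) → Prop
  | nil {p : List Int} : par[p]? = some none → pvChain par p []
  | step {p prev d : List Int} {path : List (List Int)} :
      par[p]? = some (some (prev, d)) → pvChain par prev path →
      pvChain par p (path ++ [d])

-- inserting a FRESH key preserves every chain (chains only look at present keys)
theorem pvChain_insert {par : Std.HashMap (List Int) (Option (List Int × List Int))}
    {np : List Int} (hfresh : par[np]? = none)
    {w : Option (List Int × List Int)} {p : List Int} {path : List (List Int)}
    (h : pvChain par p path) : pvChain (par.insert np w) p path := by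
  induction h with
  | nil hget =>
    refine .nil ?_
    rw [Std.HashMap.getElem?_insert, if_neg, hget]
    simp only [beq_iff_eq]
    rintro rfl; rw [hget] at hfresh; cases hfresh
  | step hget _ ih =>
    refine .step ?_ ih
    rw [Std.HashMap.getElem?_insert, if_neg, hget]
    simp only [beq_iff_eq]
    rintro rfl; rw [hget] at hfresh; cases hfresh

theorem pvReconB_of_chain {par : Std.HashMap (List Int) (Option (List Int × List Int))}
    {p : List Int} {path : List (List Int)} (h : pvChain par p path) :
    ∀ (f : Nat) (acc : List (List Int)), path.length < f →
      pvReconB f par p acc = path ++ acc.reverse := by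
  induction h with
  | nil hget =>
    intro f acc hf
    cases f with
    | zero => omega
    | succ f => simp [pvReconB, hget]
  | step hget _ ih =>
    intro f acc hf
    cases f with
    | zero => omega
    | succ f =>
      simp only [pvReconB, hget]
      rw [ih f (acc ++ [_]) (by simpa using Nat.lt_of_succ_lt_succ (by simpa using hf))]
      simp

-- The lockstep invariant between A's state (queue of (pos, path), visited set)
-- and B's state (queue of positions, parent dict).
def pvInv (par : Std.HashMap (List Int) (Option (List Int × List Int)))
    (vis : Std.HashSet (List Int)) (qA : List (List Int × List (List Int)))
    (qB : List (List Int)) : Prop :=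
  (∀ k, vis.contains k = par.contains k) ∧
  List.Forall₂ (fun (a : List Int × List (List Int)) (p : List Int) =>
    a.1 = p ∧ pvChain par p a.2 ∧ a.2.length < par.size) qA qB

-- one whole neighbour expansion: A's direction recursion vs B's fold over the
-- precomputed (direction, neighbour) pairs
theorem pvDirLoop_eq (obstacles : List (List Int)) (rows cols : Int) (cur : List Int)
    (path : List (List Int)) :
    ∀ (ds : List (List Int)) (qA : List (List Int × List (List Int)))
      (qB : List (List Int)) (vis : Std.HashSet (List Int))
      (par : Std.HashMap (List Int) (Option (List Int × List Int))),
      pvInv par vis qA qB →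
      pvChain par cur path → path.length < par.size →
      (let A := pvDirLoopA obstacles rows cols cur path ds qA vis
       let B := (ds.map (fun d =>
         (d, [PySem.List.pyGetD cur 0 0 + PySem.List.pyGetD d 0 0,
              PySem.List.pyGetD cur 1 0 + PySem.List.pyGetD d 1 0]))).foldl
         (pvStepB obstacles rows cols cur) (qB, par)
       pvInv B.2 A.2 A.1 B.1) := by
  intro ds
  induction ds with
  | nil =>
    intro qA qB vis par hinv _ _
    exact hinv
  | cons d ds ih =>
    intro qA qB vis par hinv hchain hlen
    obtain ⟨hkeys, hq⟩ := hinv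
    simp only [pvDirLoopA, List.map_cons, List.foldl_cons]
    set np : List Int := [PySem.List.pyGetD cur 0 0 + PySem.List.pyGetD d 0 0,
                          PySem.List.pyGetD cur 1 0 + PySem.List.pyGetD d 1 0] with hnp
    by_cases hc : 0 ≤ PySem.List.pyGetD np 0 0 ∧ PySem.List.pyGetD np 0 0 < rows ∧
       0 ≤ PySem.List.pyGetD np 1 0 ∧ PySem.List.pyGetD np 1 0 < cols ∧
       np ∉ obstacles ∧ vis.contains np = false
    · have hnc : par.contains np = false := by rw [← hkeys np]; exact hc.2.2.2.2.2
      have hfresh : par[np]? = none := by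
        apply Std.HashMap.getElem?_eq_none
        simp [Std.HashMap.mem_iff_contains, hnc]
      have hcB : 0 ≤ PySem.List.pyGetD np 0 0 ∧ PySem.List.pyGetD np 0 0 < rows ∧
          0 ≤ PySem.List.pyGetD np 1 0 ∧ PySem.List.pyGetD np 1 0 < cols ∧
          np ∉ obstacles ∧ par.contains np = false :=
        ⟨hc.1, hc.2.1, hc.2.2.1, hc.2.2.2.1, hc.2.2.2.2.1, hnc⟩
      rw [if_pos hc]
      simp only [pvStepB, if_pos hcB]
      have hsize : (par.insert np (some (cur, d))).size = par.size + 1 := by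
        rw [Std.HashMap.size_insert, if_neg]
        simp [Std.HashMap.mem_iff_contains, hnc]
      apply ih
      · refine ⟨?_, ?_⟩
        · intro k
          rw [Std.HashSet.contains_insert, Std.HashMap.contains_insert, hkeys k]
        · refine List.rel_append ?_ ?_
          · exact List.Forall₂.imp
              (fun a b h => ⟨h.1, pvChain_insert hfresh h.2.1, by rw [hsize]; omega⟩) hq
          · refine .cons ⟨rfl, ?_, by rw [hsize]; simp; omega⟩ .nil
            refine pvChain.step ?_ (pvChain_insert hfresh hchain)
            rw [Std.HashMap.getElem?_insert, if_pos]
            simp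
      · exact pvChain_insert hfresh hchain
      · rw [hsize]; omega
    · have hcB : ¬ (0 ≤ PySem.List.pyGetD np 0 0 ∧ PySem.List.pyGetD np 0 0 < rows ∧
          0 ≤ PySem.List.pyGetD np 1 0 ∧ PySem.List.pyGetD np 1 0 < cols ∧
          np ∉ obstacles ∧ par.contains np = false) := by
        intro h
        exact hc ⟨h.1, h.2.1, h.2.2.1, h.2.2.2.1, h.2.2.2.2.1, by
          rw [hkeys np]; exact h.2.2.2.2.2⟩
      rw [if_neg hc]
      simp only [pvStepB, if_neg hcB]
      exact ih qA qB vis par ⟨hkeys, hq⟩ hchain hlen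

theorem pvLoop_eq (goal : List Int) (obstacles : List (List Int)) (rows cols : Int) :
    ∀ (f : Nat) (qA : List (List Int × List (List Int))) (qB : List (List Int))
      (vis : Std.HashSet (List Int))
      (par : Std.HashMap (List Int) (Option (List Int × List Int))),
      pvInv par vis qA qB →
      pvLoopA goal obstacles rows cols f qA vis =
        pvLoopB goal obstacles rows cols f qB par := by
  intro f
  induction f with
  | zero => intro qA qB vis par _; rfl
  | succ f ih =>
    intro qA qB vis par hinv
    obtain ⟨hkeys, hq⟩ := hinv
    cases hq with
    | nil => rfl
    | @cons a cur restA restB hhead htail =>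
      obtain ⟨ha1, hchain, hlen⟩ := hhead
      obtain ⟨cur', path⟩ := a
      cases ha1
      by_cases hg : cur' = goal
      · simp only [pvLoopA, pvLoopB, if_pos hg]
        subst hg
        rw [pvReconB_of_chain hchain par.size [] hlen]
        simp
      · simp only [pvLoopA, pvLoopB, if_neg hg]
        have hcand :
            ([([-1, 0], [PySem.List.pyGetD cur' 0 0 - 1, PySem.List.pyGetD cur' 1 0]),
              ([1, 0], [PySem.List.pyGetD cur' 0 0 + 1, PySem.List.pyGetD cur' 1 0]),
              ([0, -1], [PySem.List.pyGetD cur' 0 0, PySem.List.pyGetD cur' 1 0 - 1]),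
              ([0, 1], [PySem.List.pyGetD cur' 0 0, PySem.List.pyGetD cur' 1 0 + 1])]
              : List (List Int × List Int)) =
            pvDirs.map (fun d =>
              (d, [PySem.List.pyGetD cur' 0 0 + PySem.List.pyGetD d 0 0,
                   PySem.List.pyGetD cur' 1 0 + PySem.List.pyGetD d 1 0])) := by
          simp [pvDirs, PySem.List.pyGetD]
          norm_num [Int.sub_eq_add_neg]
        rw [hcand]
        have h := pvDirLoop_eq obstacles rows cols cur' path pvDirs restA restB vis par
          ⟨hkeys, htail⟩ hchain hlen
        exact ih _ _ _ _ h

-- ===== VERDICT (by name: the statement is the Claim_ definition above) =====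
theorem bfs_spec : Claim_equal_bfs := by
  intro start goal obstacles rows cols _ _
  unfold Spec_bfs bfs bfs_alt
  apply pvLoop_eq
  refine ⟨?_, ?_⟩
  · intro k
    rw [Std.HashSet.contains_insert, Std.HashMap.contains_insert,
      Std.HashSet.contains_emptyWithCapacity, Std.HashMap.contains_emptyWithCapacity]
  · refine .cons ⟨rfl, .nil ?_, ?_⟩ .nil
    · rw [Std.HashMap.getElem?_insert, if_pos]
      simp
    · rw [Std.HashMap.size_insert, if_neg (by simp)]
      simp [Std.HashMap.size_emptyWithCapacity]
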